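-- pv_equiv track=rewrite | github.com/hugocruzz/subocean | src/preprocessing/pressure_gridder_deprecated.py | clean_name_for_netcdf
-- ===== SOURCE A (Python) =====
-- def clean_name_for_netcdf(name: str) -> str:
--     """Clean name for NetCDF compatibility"""
--     # Replace invalid characters
--     cleaned = (name.replace('-', '_')
--                   .replace(' ', '_')
--                   .replace(':', '_')
--                   .replace('.', '_')
--                   .replace('/', '_')
--                   .replace('\\', '_'))
--     # Remove any remaining non-alphanumeric characters
--     cleaned = ''.join(c for c in cleaned if c.isalnum() or c == '_')
--     # Ensure starts with letter
--     if cleaned and not cleaned[0].isalpha():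
--         cleaned = 'var_' + cleaned
--     return cleaned
-- ===== SOURCE B (Python) =====
-- def clean_name_for_netcdf(name: str) -> str:
--     """Clean name for NetCDF compatibility (single-pass re-implementation)."""
--     to_underscore = {'-', ' ', ':', '.', '/', '\\'}
--     cleaned = ''.join(
--         '_' if c in to_underscore else c
--         for c in name
--         if c in to_underscore or c.isalnum() or c == '_'
--     )
--     if cleaned and not cleaned[0].isalpha():
--         cleaned = 'var_' + cleaned
--     return cleaned
-- ===== Notes on version B (the rewrite author's own statement) =====
-- stated objective: alternative
-- what changed: Replaces six chained .replace scans plus a separate filtering comprehension (seven passes over intermediate strings) with a single per-character pass that maps separator characters to underscores and drops other non-identifier characters; it trades C-level str.replace passes for one Python-level traversal.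
import Mathlib
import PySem

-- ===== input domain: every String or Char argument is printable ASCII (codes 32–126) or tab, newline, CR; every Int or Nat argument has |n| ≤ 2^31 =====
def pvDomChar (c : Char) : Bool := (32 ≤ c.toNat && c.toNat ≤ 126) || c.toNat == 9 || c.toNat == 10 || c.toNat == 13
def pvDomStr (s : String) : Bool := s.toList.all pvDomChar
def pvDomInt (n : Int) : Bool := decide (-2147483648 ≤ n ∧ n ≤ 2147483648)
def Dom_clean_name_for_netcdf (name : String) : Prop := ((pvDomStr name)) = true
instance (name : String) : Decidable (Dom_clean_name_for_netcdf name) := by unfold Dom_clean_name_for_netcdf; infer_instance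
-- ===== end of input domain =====

-- B replaces A's six chained .replace passes plus a separate filter pass by one
-- single pass over the characters (objective: alternative decomposition, same cost).

-- ===== PORT A =====
-- literal transliteration: six chained str.replace calls, then a filtering join,
-- then the 'starts with a letter' guard.
def clean_name_for_netcdf (name : String) : String :=
  let cleaned :=
    PySem.Str.replace
      (PySem.Str.replace
        (PySem.Str.replace
          (PySem.Str.replace
            (PySem.Str.replace
              (PySem.Str.replace name "-" "_")
              " " "_")
            ":" "_")
          "." "_")
        "/" "_")
      "\\" "_"
  let cleaned := String.ofList
    (cleaned.toList.filter (fun c => PySem.Chars.isalnum c || c == '_'))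
  match cleaned.toList with
  | [] => cleaned
  | c :: _ => if ¬ (PySem.Chars.isalpha c = true) then "var_" ++ cleaned else cleaned

-- ===== PORT B =====
-- single pass: separators become '_', other non-identifier characters are dropped.
def pvIsSep (c : Char) : Bool :=
  c == '-' || c == ' ' || c == ':' || c == '.' || c == '/' || c == '\\'

def clean_name_for_netcdf_alt (name : String) : String :=
  let cleaned := String.ofList
    (name.toList.filterMap (fun c =>
      if pvIsSep c then some '_'
      else if PySem.Chars.isalnum c || c == '_' then some c
      else none))
  match cleaned.toList with
  | [] => cleaned
  | c :: _ => if ¬ (PySem.Chars.isalpha c = true) then "var_" ++ cleaned else cleaned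

-- ===== PRECONDITION & SPEC =====
def Spec_clean_name_for_netcdf (name : String) (out : String) : Prop := out = clean_name_for_netcdf_alt name
instance (name : String) (out : String) : Decidable (Spec_clean_name_for_netcdf name out) := by unfold Spec_clean_name_for_netcdf; infer_instance

-- ===== CLAIM (what is proved, stated in full; the proofs are below) =====
def Claim_equal_clean_name_for_netcdf : Prop := ∀ (name : String), Dom_clean_name_for_netcdf name → Spec_clean_name_for_netcdf name (clean_name_for_netcdf name)

-- ===== LEMMAS AND PROOFS =====

-- str.replace with a single-char pattern is a pointwise map
theorem replace_go_single (o n : Char) (l : List Char) :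
    ∀ (fuel : Nat) (acc : List Char), l.length ≤ fuel →
    PySem.Chars.replace.go [o] [n] fuel l acc
      = acc.reverse ++ l.map (fun c => if c == o then n else c) := by
  induction l with
  | nil =>
    intro fuel acc _
    cases fuel <;> simp [PySem.Chars.replace.go]
  | cons c t ih =>
    intro fuel acc h
    cases fuel with
    | zero => simp at h
    | succ m =>
      simp only [PySem.Chars.replace.go]
      by_cases hc : o == c
      · have hpre : List.isPrefixOf [o] (c :: t) = true := by
          simp [List.isPrefixOf, hc]
        rw [if_pos hpre, show List.drop [o].length (c :: t) = t from rfl,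
            ih m _ (by simpa using h)]
        simp [List.map_cons, eq_of_beq hc]
      · have hpre : List.isPrefixOf [o] (c :: t) = false := by
          simp only [List.isPrefixOf, Bool.and_eq_false_iff]
          left
          cases hb : o == c
          · rfl
          · exact absurd hb hc
        rw [if_neg (by simp [hpre]), ih m _ (by simpa using h)]
        have hcb : (c == o) = false := by
          cases hb : c == o
          · rfl
          · exact absurd (by simp [eq_of_beq hb]) hc
        rw [List.map_cons, if_neg (by simp [hcb] : ¬ ((c == o) = true))]
        simp

theorem replace_single (o n : Char) (cs : List Char) :
    PySem.Chars.replace cs [o] [n] = cs.map (fun c => if c == o then n else c) := by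
  simp [PySem.Chars.replace, replace_go_single o n cs cs.length [] (le_refl _)]

-- a Bool filter as a filterMap
theorem filter_as_filterMap (l : List Char) (p : Char → Bool) :
    l.filter p = l.filterMap (fun a => if p a then some a else none) := by
  induction l with
  | nil => rfl
  | cons a t ih => by_cases h : p a <;> simp [h, ih]

-- ===== VERDICT (by name: the statement is the Claim_ definition above) =====
theorem clean_name_for_netcdf_spec : Claim_equal_clean_name_for_netcdf := by
  intro name _
  show clean_name_for_netcdf name = clean_name_for_netcdf_alt name
  unfold clean_name_for_netcdf clean_name_for_netcdf_alt
  have hlist :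
      (PySem.Str.replace
        (PySem.Str.replace
          (PySem.Str.replace
            (PySem.Str.replace
              (PySem.Str.replace
                (PySem.Str.replace name "-" "_")
                " " "_")
              ":" "_")
            "." "_")
          "/" "_")
        "\\" "_").toList.filter (fun c => PySem.Chars.isalnum c || c == '_')
      = name.toList.filterMap (fun c =>
          if pvIsSep c then some '_'
          else if PySem.Chars.isalnum c || c == '_' then some c
          else none) := by
    simp only [PySem.Str.toList_replace]
    rw [show ("-" : String).toList = ['-'] by decide,
        show (" " : String).toList = [' '] by decide,
        show (":" : String).toList = [':'] by decide,
        show ("." : String).toList = ['.'] by decide,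
        show ("/" : String).toList = ['/'] by decide,
        show ("\\" : String).toList = ['\\'] by decide,
        show ("_" : String).toList = ['_'] by decide]
    rw [replace_single, replace_single, replace_single, replace_single,
        replace_single, replace_single]
    rw [filter_as_filterMap]
    rw [List.filterMap_map, List.filterMap_map, List.filterMap_map,
        List.filterMap_map, List.filterMap_map, List.filterMap_map]
    apply List.filterMap_congr
    intro c _
    simp only [Function.comp_apply]
    by_cases hs : pvIsSep c = true
    · have hs' := hs
      simp only [pvIsSep, Bool.or_eq_true, beq_iff_eq] at hs'
      rcases hs' with ((((h|h)|h)|h)|h)|h <;> subst h <;> decide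
    · have hs' := hs
      simp only [pvIsSep, Bool.or_eq_true, beq_iff_eq, not_or] at hs'
      obtain ⟨⟨⟨⟨⟨h1, h2⟩, h3⟩, h4⟩, h5⟩, h6⟩ := hs'
      have b1 : (c == '-') = false := by simp [h1]
      have b2 : (c == ' ') = false := by simp [h2]
      have b3 : (c == ':') = false := by simp [h3]
      have b4 : (c == '.') = false := by simp [h4]
      have b5 : (c == '/') = false := by simp [h5]
      have b6 : (c == '\\') = false := by simp [h6]
      simp only [b1, b2, b3, b4, b5, b6, Bool.false_eq_true, if_false]
      rw [if_neg hs]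
  simp only [hlist]
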